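-- pv_equiv track=rewrite | github.com/smaillot/hash-code-training | pizza/stats.py | cumul
-- ===== SOURCE A (Python) =====
-- def cumul(data1, data2):
--     best = 0
--     best2 = 0
--     out1 = []
--     out2 = []
--     out3 = []
--     out4 = []
--     for i in range(len(data1)):
--         if data1[i] > data1[best]:
--             best = i
--         if data2[i] > data2[best2]:
--             best2 = i
--         out1.append(data1[best])
--         out2.append(data2[best])
--         out3.append(data1[best2])
--         out4.append(data2[best2])
--     return out1, out2, out3, out4
-- ===== SOURCE B (Python) =====
-- def prefix_argmax(d, lo, hi):
--     # divide and conquer: list of argmax of d[lo..i] (earliest index on ties) for i in range(lo, hi)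
--     if hi - lo <= 1:
--         return [lo] * (hi - lo)
--     mid = (lo + hi) // 2
--     left = prefix_argmax(d, lo, mid)
--     right = prefix_argmax(d, mid, hi)
--     b = left[-1]
--     return left + [r if d[r] > d[b] else b for r in right]
--
-- def cumul(data1, data2):
--     n = len(data1)
--     pref1 = prefix_argmax(data1, 0, n)
--     pref2 = prefix_argmax(data2, 0, n)
--     return ([data1[b] for b in pref1], [data2[b] for b in pref1],
--             [data1[b] for b in pref2], [data2[b] for b in pref2])
-- ===== Notes on version B (the rewrite author's own statement) =====
-- stated objective: alternative
-- what changed: Replaces A's single stateful loop carrying two running-argmax registers by a divide-and-conquer prefix-argmax (split the index range, recurse on both halves, merge the right half against the left half's final argmax) followed by four gather comprehensions.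
import Mathlib
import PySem

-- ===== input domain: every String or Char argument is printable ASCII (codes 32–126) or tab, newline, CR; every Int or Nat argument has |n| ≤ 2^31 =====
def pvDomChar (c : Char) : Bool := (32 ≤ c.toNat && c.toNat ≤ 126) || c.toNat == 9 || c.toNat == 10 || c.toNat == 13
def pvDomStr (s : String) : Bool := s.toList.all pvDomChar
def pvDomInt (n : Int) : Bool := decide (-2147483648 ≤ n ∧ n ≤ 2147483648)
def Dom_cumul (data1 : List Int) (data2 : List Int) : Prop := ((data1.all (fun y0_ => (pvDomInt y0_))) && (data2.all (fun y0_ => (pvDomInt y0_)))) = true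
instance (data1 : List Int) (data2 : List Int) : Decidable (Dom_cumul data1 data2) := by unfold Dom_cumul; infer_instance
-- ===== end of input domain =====

-- B replaces A's stateful running-argmax loop by a divide-and-conquer prefix-argmax plus gathers (alternative decomposition).

-- list indexing xs[i]; under Pre_cumul every index either program uses is in range, so the default is never returned
def pvGet (d : List Int) (i : Int) : Int := (PySem.List.pyGet? d i).getD 0

-- ===== PORT A =====
-- one step of A's fused loop: state = (best, best2, out1, out2, out3, out4)
def stepA (data1 data2 : List Int)
    (st : Int × Int × List Int × List Int × List Int × List Int) (i : Int) :
    Int × Int × List Int × List Int × List Int × List Int :=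
  let best := if pvGet data1 i > pvGet data1 st.1 then i else st.1
  let best2 := if pvGet data2 i > pvGet data2 st.2.1 then i else st.2.1
  (best, best2, st.2.2.1 ++ [pvGet data1 best], st.2.2.2.1 ++ [pvGet data2 best],
   st.2.2.2.2.1 ++ [pvGet data1 best2], st.2.2.2.2.2 ++ [pvGet data2 best2])

def cumul (data1 : List Int) (data2 : List Int) : List Int × List Int × List Int × List Int :=
  let s := (PySem.List.pyRange 0 (data1.length : Int) 1).foldl (stepA data1 data2)
              (0, 0, [], [], [], [])
  (s.2.2.1, s.2.2.2.1, s.2.2.2.2.1, s.2.2.2.2.2)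

-- ===== PORT B =====
-- floor division by two in the form omega understands (cited by prefixArgmax's decreasing_by)
lemma floordiv_two (a : Int) : PySem.Int.floordiv a 2 = a / 2 := by
  simp [PySem.Int.floordiv, Int.fdiv_eq_ediv]

-- prefix_argmax(d, lo, hi): divide and conquer; [lo]*(hi-lo) is List.replicate, left[-1] is pyGet? at -1
def prefixArgmax (d : List Int) (lo hi : Int) : List Int :=
  if hi - lo ≤ 1 then List.replicate (hi - lo).toNat lo
  else
    let mid := PySem.Int.floordiv (lo + hi) 2
    let left := prefixArgmax d lo mid
    let right := prefixArgmax d mid hi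
    let b := (PySem.List.pyGet? left (-1)).getD 0
    left ++ right.map (fun r => if pvGet d r > pvGet d b then r else b)
termination_by (hi - lo).toNat
decreasing_by
  · simp only [floordiv_two]; omega
  · simp only [floordiv_two]; omega

def cumul_alt (data1 : List Int) (data2 : List Int) : List Int × List Int × List Int × List Int :=
  let n : Int := (data1.length : Int)
  let pref1 := prefixArgmax data1 0 n
  let pref2 := prefixArgmax data2 0 n
  (pref1.map (fun b => pvGet data1 b), pref1.map (fun b => pvGet data2 b),
   pref2.map (fun b => pvGet data1 b), pref2.map (fun b => pvGet data2 b))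

-- ===== PRECONDITION & SPEC =====
-- Pre_ excludes exactly the inputs where A raises IndexError: data2 shorter than data1 (B raises there too)
def Pre_cumul (data1 : List Int) (data2 : List Int) : Prop := data1.length ≤ data2.length
instance (data1 : List Int) (data2 : List Int) : Decidable (Pre_cumul data1 data2) := by
  unfold Pre_cumul; infer_instance

def pvWitness_cumul : List Int × List Int := ([1, 3, 2], [5, 4, 6])

def Spec_cumul (data1 : List Int) (data2 : List Int) (out : List Int × List Int × List Int × List Int) : Prop := out = cumul_alt data1 data2
instance (data1 : List Int) (data2 : List Int) (out : List Int × List Int × List Int × List Int) : Decidable (Spec_cumul data1 data2 out) := by unfold Spec_cumul; infer_instance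

-- ===== CLAIM (what is proved, stated in full; the proofs are below) =====
def Claim_equal_cumul : Prop := ∀ (data1 : List Int) (data2 : List Int), Dom_cumul data1 data2 → Pre_cumul data1 data2 → Spec_cumul data1 data2 (cumul data1 data2)

-- ===== LEMMAS AND PROOFS =====

-- A's register update
def stepB (d : List Int) (b i : Int) : Int := if pvGet d i > pvGet d b then i else b

-- A's register value after the iterations 0..i
def bestF (d : List Int) (i : Int) : Int :=
  (PySem.List.pyRange 0 (i + 1) 1).foldl (stepB d) 0

-- u is the earliest argmax of d over the index window [lo, i]
def IsPA (d : List Int) (lo i u : Int) : Prop :=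
  lo ≤ u ∧ u ≤ i ∧ ∀ v, lo ≤ v → v ≤ i → pvGet d v < pvGet d u ∨ (pvGet d v = pvGet d u ∧ u ≤ v)

lemma IsPA_unique {d : List Int} {lo i u v : Int}
    (hu : IsPA d lo i u) (hv : IsPA d lo i v) : u = v := by
  obtain ⟨hu1, hu2, hu3⟩ := hu
  obtain ⟨hv1, hv2, hv3⟩ := hv
  rcases hu3 v hv1 hv2 with h | ⟨he, hl⟩ <;> rcases hv3 u hu1 hu2 with h' | ⟨he', hl'⟩ <;> omega

lemma prefixArgmax_length (d : List Int) : ∀ (n : Nat) (lo hi : Int), (hi - lo).toNat = n →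
    (prefixArgmax d lo hi).length = (hi - lo).toNat := by
  intro n
  induction n using Nat.strong_induction_on with
  | _ n ih =>
    intro lo hi hn
    rw [prefixArgmax]
    split_ifs with h
    · simp
    · simp only [floordiv_two] at *
      rw [List.length_append, List.length_map,
        ih (((lo + hi) / 2 - lo).toNat) (by omega) lo ((lo + hi) / 2) rfl,
        ih ((hi - (lo + hi) / 2).toNat) (by omega) ((lo + hi) / 2) hi rfl]
      omega

lemma prefixArgmax_isPA (d : List Int) : ∀ (n : Nat) (lo hi : Int), (hi - lo).toNat = n →
    ∀ (k : Nat), k < (prefixArgmax d lo hi).length →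
      IsPA d lo (lo + (k : Int)) ((prefixArgmax d lo hi).getD k 0) := by
  intro n
  induction n using Nat.strong_induction_on with
  | _ n ih =>
    intro lo hi hn k hk
    rw [prefixArgmax] at hk ⊢
    split_ifs at hk ⊢ with h
    · -- base case: the list is [lo]*(hi-lo), every element is lo, k = 0
      have hk0 : k = 0 := by simp at hk; omega
      subst hk0
      have : (List.replicate (hi - lo).toNat lo).getD 0 0 = lo := by
        simp at hk
        cases hcase : (hi - lo).toNat with
        | zero => omega
        | succ m => simp
      rw [this]
      refine ⟨by omega, by omega, ?_⟩
      intro v hv1 hv2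
      have : v = lo := by omega
      subst this
      exact Or.inr ⟨rfl, le_refl _⟩
    · simp only [floordiv_two] at *
      set mid := (lo + hi) / 2 with hmid
      have hmlo : lo < mid := by omega
      have hmhi : mid < hi := by omega
      have hlenL : (prefixArgmax d lo mid).length = (mid - lo).toNat :=
        prefixArgmax_length d _ lo mid rfl
      have hlenR : (prefixArgmax d mid hi).length = (hi - mid).toNat :=
        prefixArgmax_length d _ mid hi rfl
      set L := prefixArgmax d lo mid with hL
      set R := prefixArgmax d mid hi with hR
      -- the pivot b = L[-1] is the earliest argmax of [lo, mid-1]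
      have hLne : 0 < L.length := by omega
      have hbval : (PySem.List.pyGet? L (-1)).getD 0 = L.getD (L.length - 1) 0 := by
        have h1 : -(L.length : Int) ≤ -1 := by omega
        simp [PySem.List.pyGet?, PySem.List.pyIdx?, h1,
          List.getElem?_eq_getElem (by omega : L.length - 1 < L.length), List.getD]
      have hbPA : IsPA d lo (mid - 1) ((PySem.List.pyGet? L (-1)).getD 0) := by
        have := ih ((mid - lo).toNat) (by omega) lo mid rfl (L.length - 1)
          (by rw [← hL]; omega)
        rw [← hL] at this
        have harith : lo + ((L.length - 1 : Nat) : Int) = mid - 1 := by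
          rw [hlenL]; omega
        rw [harith] at this
        rw [hbval]
        exact this
      set b := (PySem.List.pyGet? L (-1)).getD 0 with hbdef
      by_cases hkL : k < L.length
      · -- position inside the left half
        rw [List.getD_append _ _ _ _ hkL]
        exact (by
          have := ih ((mid - lo).toNat) (by omega) lo mid rfl k (by omega)
          rw [← hL] at this; exact this)
      · -- position in the right half: combine b with the right-half argmax r
        push Not at hkL
        have hkR : k - L.length < (R.map (fun r => if pvGet d r > pvGet d b then r else b)).length := by
          simp only [List.length_map]
          simp only [List.length_append, List.length_map] at hk
          omega
        rw [List.getD_append_right _ _ _ _ hkL]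
        have hgetmap : (R.map (fun r => if pvGet d r > pvGet d b then r else b)).getD (k - L.length) 0
            = (fun r => if pvGet d r > pvGet d b then r else b) (R.getD (k - L.length) 0) := by
          have hkR' : k - L.length < R.length := by simpa using hkR
          simp [List.getD, List.getElem?_eq_getElem (by simpa using hkR)]
        rw [hgetmap]
        have hrPA : IsPA d mid (mid + ((k - L.length : Nat) : Int)) (R.getD (k - L.length) 0) := by
          have := ih ((hi - mid).toNat) (by omega) mid hi rfl (k - L.length) (by rw [← hR] at *; simpa using hkR)
          rw [← hR] at this; exact this
        set r := R.getD (k - L.length) 0 with hrdef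
        have harith2 : mid + ((k - L.length : Nat) : Int) = lo + (k : Int) := by
          rw [hlenL] at hkL ⊢
          have : ((k - (mid - lo).toNat : Nat) : Int) = (k : Int) - (mid - lo) := by omega
          rw [this]; ring
        rw [harith2] at hrPA
        obtain ⟨hr1, hr2, hr3⟩ := hrPA
        obtain ⟨hb1, hb2, hb3⟩ := hbPA
        by_cases hcmp : pvGet d r > pvGet d b
        · simp only [hcmp, if_pos]
          refine ⟨by omega, hr2, ?_⟩
          intro v hv1 hv2
          by_cases hvm : mid ≤ v
          · exact hr3 v hvm hv2
          · -- v in the left window: its value is at most d[b] < d[r]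
            rcases hb3 v hv1 (by omega) with h' | ⟨he', _⟩
            · exact Or.inl (by omega)
            · exact Or.inl (by omega)
        · simp only [if_neg hcmp]
          push Not at hcmp
          refine ⟨hb1, by omega, ?_⟩
          intro v hv1 hv2
          by_cases hvm : mid ≤ v
          · -- v in the right window: d[v] ≤ d[r] ≤ d[b]; ties resolve to b since b < mid ≤ v
            rcases hr3 v hvm hv2 with h' | ⟨he', _⟩
            · rcases lt_or_eq_of_le hcmp with h'' | h''
              · exact Or.inl (by omega)
              · rw [h''] at h'; exact Or.inl h'
            · rcases lt_or_eq_of_le hcmp with h'' | h''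
              · exact Or.inl (by omega)
              · exact Or.inr ⟨by omega, by omega⟩
          · exact hb3 v hv1 (by omega)

-- bestF: one more iteration folds in index m+1
lemma bestF_succ (d : List Int) (m : Nat) :
    bestF d ((m : Int) + 1) = stepB d (bestF d (m : Int)) ((m : Int) + 1) := by
  unfold bestF
  rw [show (m : Int) + 1 + 1 = ((m : Int) + 1) + 1 by ring,
    PySem.List.pyRange_one_succ_right (by omega : (0 : Int) ≤ (m : Int) + 1), List.foldl_append]
  rfl

lemma bestF_isPA (d : List Int) : ∀ (m : Nat), IsPA d 0 (m : Int) (bestF d (m : Int)) := by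
  intro m
  induction m with
  | zero =>
      have h0 : bestF d 0 = 0 := by
        unfold bestF
        rw [show (0 : Int) + 1 = 0 + 1 from rfl,
          PySem.List.pyRange_one_cons (by omega : (0:Int) < 0 + 1),
          PySem.List.pyRange_one_eq_nil (by omega)]
        simp [stepB]
      rw [show ((0 : Nat) : Int) = 0 by rfl, h0]
      refine ⟨le_refl _, le_refl _, ?_⟩
      intro v hv1 hv2
      have : v = 0 := by omega
      subst this
      exact Or.inr ⟨rfl, le_refl _⟩
  | succ m ih =>
      rw [show ((m + 1 : Nat) : Int) = (m : Int) + 1 by push_cast; ring, bestF_succ]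
      obtain ⟨hs1, hs2, hs3⟩ := ih
      unfold stepB
      by_cases hcmp : pvGet d ((m : Int) + 1) > pvGet d (bestF d (m : Int))
      · simp only [hcmp, if_pos]
        refine ⟨by omega, le_refl _, ?_⟩
        intro v hv1 hv2
        by_cases hvm : v ≤ (m : Int)
        · rcases hs3 v hv1 hvm with h' | ⟨he', _⟩
          · exact Or.inl (by omega)
          · exact Or.inl (by omega)
        · have : v = (m : Int) + 1 := by omega
          subst this
          exact Or.inr ⟨rfl, le_refl _⟩
      · simp only [if_neg hcmp]
        push Not at hcmp
        refine ⟨hs1, by omega, ?_⟩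
        intro v hv1 hv2
        by_cases hvm : v ≤ (m : Int)
        · exact hs3 v hv1 hvm
        · have : v = (m : Int) + 1 := by omega
          subst this
          rcases lt_or_eq_of_le hcmp with h'' | h''
          · exact Or.inl h''
          · exact Or.inr ⟨h'', by omega⟩

-- traj: the values A's registers take, one per iteration
def traj (d : List Int) (b : Int) : List Int → List Int
  | [] => []
  | i :: is =>
    let b' := if pvGet d i > pvGet d b then i else b
    b' :: traj d b' is

lemma traj_append (d : List Int) :
    ∀ (xs ys : List Int) (b : Int),
      traj d b (xs ++ ys) = traj d b xs ++ traj d (xs.foldl (stepB d) b) ys := by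
  intro xs
  induction xs with
  | nil => intro ys b; simp [traj]
  | cons x xs ih => intro ys b; simp [traj, ih, stepB]

-- A's register trajectory over range(n) lists the per-prefix argmax registers bestF 0, …, bestF (n-1)
lemma traj_range (d : List Int) (n : Nat) :
    traj d 0 (PySem.List.pyRange 0 (n : Int) 1)
      = (PySem.List.pyRange 0 (n : Int) 1).map (fun i => bestF d i) := by
  induction n with
  | zero => simp [PySem.List.pyRange_one_eq_nil, traj]
  | succ n ih =>
      have hle : (0 : Int) ≤ (n : Int) := by omega
      have hcast : ((n + 1 : Nat) : Int) = (n : Int) + 1 := by push_cast; ring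
      rw [hcast, PySem.List.pyRange_one_succ_right hle, traj_append, ih, List.map_append]
      congr 1
      simp only [traj, List.map_cons, List.map_nil, List.cons.injEq, and_true]
      unfold bestF
      rw [PySem.List.pyRange_one_succ_right hle, List.foldl_append]
      rfl

-- the divide-and-conquer list IS the register trajectory (both are the unique earliest prefix argmax)
lemma prefixArgmax_eq_map_bestF (d : List Int) (n : Nat) :
    prefixArgmax d 0 (n : Int) = (PySem.List.pyRange 0 (n : Int) 1).map (fun i => bestF d i) := by
  have hlen : (prefixArgmax d 0 (n : Int)).length = n := by
    rw [prefixArgmax_length d (((n : Int) - 0).toNat) 0 (n : Int) rfl]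
    omega
  apply List.ext_getElem
  · rw [hlen, List.length_map, PySem.List.length_pyRange_one]
    omega
  · intro k hk1 hk2
    have hkn : k < n := by omega
    have hrhs : ((PySem.List.pyRange 0 (n : Int) 1).map (fun i => bestF d i))[k] = bestF d (k : Int) := by
      have hkr : k < (PySem.List.pyRange 0 (n : Int) 1).length := by
        rw [PySem.List.length_pyRange_one]; omega
      rw [List.getElem_map, PySem.List.getElem_pyRange_one]
      simp
    rw [hrhs]
    have hpa := prefixArgmax_isPA d (((n : Int) - 0).toNat) 0 (n : Int) rfl k (by omega)
    have hgetD : (prefixArgmax d 0 (n : Int)).getD k 0 = (prefixArgmax d 0 (n : Int))[k] := by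
      simp [List.getD, List.getElem?_eq_getElem hk1]
    rw [hgetD] at hpa
    rw [show (0 : Int) + (k : Int) = (k : Int) by ring] at hpa
    exact IsPA_unique hpa (bestF_isPA d k)

-- A's fused fold, characterised by the trajectories
lemma foldA_eq (d1 d2 : List Int) :
    ∀ (is : List Int) (b b2 : Int) (o1 o2 o3 o4 : List Int),
      is.foldl (stepA d1 d2) (b, b2, o1, o2, o3, o4) =
        (is.foldl (stepB d1) b, is.foldl (stepB d2) b2,
         o1 ++ (traj d1 b is).map (pvGet d1),
         o2 ++ (traj d1 b is).map (pvGet d2),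
         o3 ++ (traj d2 b2 is).map (pvGet d1),
         o4 ++ (traj d2 b2 is).map (pvGet d2)) := by
  intro is
  induction is with
  | nil => intro b b2 o1 o2 o3 o4; simp [traj]
  | cons i is ih =>
      intro b b2 o1 o2 o3 o4
      simp only [List.foldl_cons, stepA, traj, stepB]
      rw [ih]
      simp

-- ===== VERDICT (by name: the statement is the Claim_ definition above) =====
theorem cumul_spec : Claim_equal_cumul := by
  intro data1 data2 _ _
  unfold Spec_cumul cumul cumul_alt
  rw [foldA_eq]
  simp only [traj_range data1 data1.length, traj_range data2 data1.length,
    prefixArgmax_eq_map_bestF, List.map_map]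
  rfl
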